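-- pv_equiv track=rewrite | github.com/khelwood/advent-of-code | 2022/d10_crt.py | find_pixels
-- ===== SOURCE A (Python) =====
-- def find_pixels(ops, w=40):
--     cycle = 0
--     value = 1
--     pixels = set()
--     for op in ops:
--         y,x = divmod(cycle, w)
--         cycle += 1
--         if abs(x-value) <= 1:
--             pixels.add((x,y))
--         if op is not None:
--             y,x = divmod(cycle, w)
--             cycle += 1
--             if abs(x-value) <= 1:
--                 pixels.add((x,y))
--             value += op
--     return pixels
-- ===== SOURCE B (Python) =====
-- def find_pixels(ops, w=40):
--     # pass 1: register value during each cycle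
--     values = []
--     value = 1
--     for op in ops:
--         values.append(value)
--         if op is not None:
--             values.append(value)
--             value += op
--     # pass 2: light pixels
--     pixels = set()
--     for c, v in enumerate(values):
--         y, x = divmod(c, w)
--         if abs(x - v) <= 1:
--             pixels.add((x, y))
--     return pixels
-- ===== Notes on version B (the rewrite author's own statement) =====
-- stated objective: alternative
-- what changed: Replaces the single interleaved loop (cycle counter, value updates and pixel tests mixed) by two passes: first build the per-cycle register-value timeline, then test every cycle index against that timeline to collect lit pixels.
import Mathlib
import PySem

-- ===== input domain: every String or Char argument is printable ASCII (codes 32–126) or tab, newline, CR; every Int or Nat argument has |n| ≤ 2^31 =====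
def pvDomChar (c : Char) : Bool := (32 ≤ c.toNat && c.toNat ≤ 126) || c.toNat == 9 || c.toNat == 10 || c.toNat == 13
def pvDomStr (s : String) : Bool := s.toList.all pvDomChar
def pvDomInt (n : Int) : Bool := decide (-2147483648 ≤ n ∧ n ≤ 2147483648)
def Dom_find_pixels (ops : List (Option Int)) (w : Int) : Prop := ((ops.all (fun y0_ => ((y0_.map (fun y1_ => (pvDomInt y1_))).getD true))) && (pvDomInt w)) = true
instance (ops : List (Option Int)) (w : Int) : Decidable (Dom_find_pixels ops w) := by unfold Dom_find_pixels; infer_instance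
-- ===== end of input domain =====

-- B replaces A's single interleaved loop by two passes (build the per-cycle value timeline,
-- then test each cycle index); same cost, different decomposition (objective: alternative).

-- ===== PORT A =====
def find_pixels (ops : List (Option Int)) (w : Int) : List (Int × Int) :=
  (ops.foldl (fun (s : Int × Int × PySem.Set (Int × Int)) op =>
      let cycle := s.1
      let value := s.2.1
      let y := PySem.Int.floordiv cycle w
      let x := PySem.Int.mod cycle w
      let cycle := cycle + 1
      let pixels := if |x - value| ≤ 1 then PySem.Set.add s.2.2 (x, y) else s.2.2
      match op with
      | none => (cycle, value, pixels)
      | some k =>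
        let y := PySem.Int.floordiv cycle w
        let x := PySem.Int.mod cycle w
        let pixels := if |x - value| ≤ 1 then PySem.Set.add pixels (x, y) else pixels
        (cycle + 1, value + k, pixels))
    (0, 1, PySem.Set.empty)).2.2

-- ===== PORT B =====
def find_pixels_alt (ops : List (Option Int)) (w : Int) : List (Int × Int) :=
  let values := (ops.foldl (fun (s : Int × List Int) op =>
      match op with
      | none => (s.1, s.2 ++ [s.1])
      | some k => (s.1 + k, s.2 ++ [s.1, s.1])) (1, ([] : List Int))).2
  (PySem.List.enumerate values).foldl (fun (pixels : PySem.Set (Int × Int)) cv =>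
      let y := PySem.Int.floordiv cv.1 w
      let x := PySem.Int.mod cv.1 w
      if |x - cv.2| ≤ 1 then PySem.Set.add pixels (x, y) else pixels) PySem.Set.empty

-- ===== PRECONDITION & SPEC =====
-- Pre_ excludes w = 0 with nonempty ops: there divmod(cycle, w) raises ZeroDivisionError in A (and in B).
def Pre_find_pixels (ops : List (Option Int)) (w : Int) : Prop := ops = [] ∨ w ≠ 0
instance (ops : List (Option Int)) (w : Int) : Decidable (Pre_find_pixels ops w) := by unfold Pre_find_pixels; infer_instance
def pvWitness_find_pixels : List (Option Int) × Int := ([some 3, none, some (-2), none], 5)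

def Spec_find_pixels (ops : List (Option Int)) (w : Int) (out : List (Int × Int)) : Prop := out = find_pixels_alt ops w
instance (ops : List (Option Int)) (w : Int) (out : List (Int × Int)) : Decidable (Spec_find_pixels ops w out) := by unfold Spec_find_pixels; infer_instance

-- ===== CLAIM (what is proved, stated in full; the proofs are below) =====
def Claim_equal_find_pixels : Prop := ∀ (ops : List (Option Int)) (w : Int), Dom_find_pixels ops w → Pre_find_pixels ops w → Spec_find_pixels ops w (find_pixels ops w)

-- ===== LEMMAS AND PROOFS =====

-- value timeline produced by B's first pass, as plain recursion
def pvVals (value : Int) : List (Option Int) → List Int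
  | [] => []
  | none :: rest => value :: pvVals value rest
  | some k :: rest => value :: value :: pvVals (value + k) rest

-- indexed pixel-collecting scan (what both programs' pixel tests amount to)
def pvScan (w c : Int) (p : PySem.Set (Int × Int)) : List Int → PySem.Set (Int × Int)
  | [] => p
  | v :: vs =>
      pvScan w (c + 1)
        (if |PySem.Int.mod c w - v| ≤ 1 then PySem.Set.add p (PySem.Int.mod c w, PySem.Int.floordiv c w) else p) vs

theorem pvA_eq (w : Int) (ops : List (Option Int)) :
    ∀ (c v : Int) (p : PySem.Set (Int × Int)),
    (ops.foldl (fun (s : Int × Int × PySem.Set (Int × Int)) op =>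
      let cycle := s.1
      let value := s.2.1
      let y := PySem.Int.floordiv cycle w
      let x := PySem.Int.mod cycle w
      let cycle := cycle + 1
      let pixels := if |x - value| ≤ 1 then PySem.Set.add s.2.2 (x, y) else s.2.2
      match op with
      | none => (cycle, value, pixels)
      | some k =>
        let y := PySem.Int.floordiv cycle w
        let x := PySem.Int.mod cycle w
        let pixels := if |x - value| ≤ 1 then PySem.Set.add pixels (x, y) else pixels
        (cycle + 1, value + k, pixels))
      (c, v, p)).2.2 = pvScan w c p (pvVals v ops) := by
  induction ops with
  | nil => intro c v p; rfl
  | cons op rest ih =>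
      intro c v p
      cases op with
      | none => simpa [pvVals, pvScan] using ih (c + 1) v _
      | some k => simpa [pvVals, pvScan] using ih (c + 1 + 1) (v + k) _

theorem pvB_vals (ops : List (Option Int)) :
    ∀ (v : Int) (acc : List Int),
    (ops.foldl (fun (s : Int × List Int) op =>
      match op with
      | none => (s.1, s.2 ++ [s.1])
      | some k => (s.1 + k, s.2 ++ [s.1, s.1])) (v, acc)).2 = acc ++ pvVals v ops := by
  induction ops with
  | nil => intro v acc; simp [pvVals]
  | cons op rest ih =>
      intro v acc
      cases op with
      | none => simp [pvVals, ih]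
      | some k => simp [pvVals, ih]

theorem pvB_scan (w : Int) (vs : List Int) :
    ∀ (c : Int) (p : PySem.Set (Int × Int)),
    (PySem.List.enumerate vs c).foldl (fun (pixels : PySem.Set (Int × Int)) cv =>
      let y := PySem.Int.floordiv cv.1 w
      let x := PySem.Int.mod cv.1 w
      if |x - cv.2| ≤ 1 then PySem.Set.add pixels (x, y) else pixels) p = pvScan w c p vs := by
  induction vs with
  | nil => intro c p; simp [PySem.List.enumerate_nil, pvScan]
  | cons v rest ih =>
      intro c p
      simp only [PySem.List.enumerate_cons, List.foldl_cons, pvScan]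
      exact ih (c + 1) _

-- ===== VERDICT (by name: the statement is the Claim_ definition above) =====
theorem find_pixels_spec : Claim_equal_find_pixels := by
  intro ops w _ _
  unfold Spec_find_pixels find_pixels find_pixels_alt
  rw [pvA_eq, pvB_vals, pvB_scan]
  simp
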